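-- pv_equiv track=rewrite | github.com/77zara/crawler_domain_education_indonesia | utils/site_config.py | match_site_config
-- ===== SOURCE A (Python) =====
-- from typing import Any
--
-- def match_site_config(hostname: str, sites: dict[str, dict[str, Any]]) -> tuple[str, dict[str, Any]] | None:
--     """Find the best matching site config for a hostname.
--
--     - exact match wins
--     - otherwise longest suffix match wins (e.g., edukasi.kompas.com -> kompas.com)
--     """
--     host = (hostname or "").strip().lower()
--     if not host:
--         return None
--
--     if host in sites:
--         return host, sites[host]
--
--     best_key = ""
--     best_val: dict[str, Any] | None = None
--     for key, val in sites.items():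
--         if not key:
--             continue
--         if host == key or host.endswith("." + key):
--             if len(key) > len(best_key):
--                 best_key = key
--                 best_val = val
--
--     if best_val is None:
--         return None
--     return best_key, best_val
-- ===== SOURCE B (Python) =====
-- def match_site_config(hostname, sites):
--     """Find the best matching site config for a hostname.
--
--     Instead of scanning every configured site, enumerate the hostname's
--     dot-suffixes from longest (the host itself) to shortest and look each
--     one up in the dict; the first hit is the longest match.
--     """
--     host = (hostname or "").strip().lower()
--     if not host:
--         return None
--     starts = [0] + [i + 1 for i, c in enumerate(host) if c == '.']
--     for i in starts:
--         key = host[i:]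
--         if key and key in sites:
--             return key, sites[key]
--     return None
-- ===== Notes on version B (the rewrite author's own statement) =====
-- stated objective: alternative
-- what changed: B enumerates the hostname's dot-suffixes from longest (the host itself) to shortest and dict-looks each up, returning the first hit, so its cost depends only on the hostname, instead of scanning every configured site and keeping the longest matching key.
import Mathlib
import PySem

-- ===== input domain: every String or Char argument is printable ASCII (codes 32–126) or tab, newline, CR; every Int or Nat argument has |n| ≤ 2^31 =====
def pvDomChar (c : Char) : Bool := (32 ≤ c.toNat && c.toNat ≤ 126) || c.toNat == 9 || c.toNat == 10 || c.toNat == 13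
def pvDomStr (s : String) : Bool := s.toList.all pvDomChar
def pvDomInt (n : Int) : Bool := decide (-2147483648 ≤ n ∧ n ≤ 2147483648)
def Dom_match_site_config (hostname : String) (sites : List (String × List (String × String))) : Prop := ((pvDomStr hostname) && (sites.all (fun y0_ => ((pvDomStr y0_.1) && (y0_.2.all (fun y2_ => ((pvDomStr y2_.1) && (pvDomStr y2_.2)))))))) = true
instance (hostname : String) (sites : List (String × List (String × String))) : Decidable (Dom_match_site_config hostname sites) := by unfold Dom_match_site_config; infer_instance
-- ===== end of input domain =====

-- B replaces A's scan over every configured site with a longest-first walk over the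
-- hostname's own dot-suffixes, looking each one up in the dict (objective: alternative).

-- ===== PORT A =====
def match_site_config (hostname : String) (sites : List (String × List (String × String))) : Option (String × (List (String × String))) :=
  let host := PySem.Str.lower (PySem.Str.strip hostname)
  if host = "" then none
  else if (PySem.Dict.mk sites).contains host then
    ((PySem.Dict.mk sites).get? host).map (fun v => (host, v))
  else
    let best := sites.foldl
      (fun (b : String × Option (List (String × String))) kv =>
        if kv.1 = "" then b
        else if host = kv.1 ∨ PySem.Str.endswith host ("." ++ kv.1) then
          if PySem.Str.len kv.1 > PySem.Str.len b.1 then (kv.1, some kv.2) else b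
        else b)
      ("", none)
    match best.2 with
    | none => none
    | some v => some (best.1, v)

-- ===== PORT B =====
def match_site_config_alt (hostname : String) (sites : List (String × List (String × String))) : Option (String × (List (String × String))) :=
  let host := PySem.Str.lower (PySem.Str.strip hostname)
  if host = "" then none
  else
    let starts : List Int :=
      0 :: (PySem.List.enumerate host.toList).filterMap
            (fun p => if p.2 = '.' then some (p.1 + 1) else none)
    starts.findSome? (fun i =>
      -- host[i:] with i ≥ 0: PySem.List.slice is exact here
      let key := String.ofList (PySem.List.slice host.toList (some i) none)
      if key ≠ "" ∧ (PySem.Dict.mk sites).contains key then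
        ((PySem.Dict.mk sites).get? key).map (fun v => (key, v))
      else none)

-- ===== PRECONDITION & SPEC =====
def Spec_match_site_config (hostname : String) (sites : List (String × List (String × String))) (out : Option (String × (List (String × String)))) : Prop := out = match_site_config_alt hostname sites
instance (hostname : String) (sites : List (String × List (String × String))) (out : Option (String × (List (String × String)))) : Decidable (Spec_match_site_config hostname sites out) := by unfold Spec_match_site_config; infer_instance

-- ===== CLAIM (what is proved, stated in full; the proofs are below) =====
def Claim_equal_match_site_config : Prop := ∀ (hostname : String) (sites : List (String × List (String × String))), Dom_match_site_config hostname sites → Spec_match_site_config hostname sites (match_site_config hostname sites)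

-- ===== LEMMAS AND PROOFS =====

-- the value type, abbreviated
abbrev pvV : Type := List (String × String)

-- A's loop body, named for the proofs (definitionally the lambda in the port)
def pvStep (host : String) (b : String × Option pvV) (kv : String × pvV) : String × Option pvV :=
  if kv.1 = "" then b
  else if host = kv.1 ∨ PySem.Str.endswith host ("." ++ kv.1) then
    if PySem.Str.len kv.1 > PySem.Str.len b.1 then (kv.1, some kv.2) else b
  else b

-- the match condition of A's loop
def pvCond (host : String) (k : String) : Prop :=
  k ≠ "" ∧ (host = k ∨ PySem.Str.endswith host ("." ++ k) = true)

-- positions just after each '.' (offset s): the Nat shadow of B's `starts` tail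
def pvDots : List Char → Nat → List Nat
  | [], _ => []
  | c :: t, n => if c = '.' then (n+1) :: pvDots t (n+1) else pvDots t (n+1)

theorem pvDots_eq_filterMap (t : List Char) (s : Nat) :
    (PySem.List.enumerate t (s : Int)).filterMap
      (fun p => if p.2 = '.' then some (p.1 + 1) else none)
    = (pvDots t s).map (fun (n : Nat) => (n : Int)) := by
  induction t generalizing s with
  | nil => simp [PySem.List.enumerate_nil, pvDots]
  | cons c t ih =>
    rw [PySem.List.enumerate_cons]
    by_cases hc : c = '.'
    · have hd : pvDots (c :: t) s = (s+1) :: pvDots t (s+1) := by simp [pvDots, hc]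
      have hs1 : (s : Int) + 1 = ((s + 1 : Nat) : Int) := by push_cast; ring
      rw [hd]
      simp only [List.filterMap_cons, hc, if_true, List.map_cons]
      rw [hs1, ih (s+1)]
    · have hd : pvDots (c :: t) s = pvDots t (s+1) := by simp [pvDots, hc]
      have hs1 : (s : Int) + 1 = ((s + 1 : Nat) : Int) := by push_cast; ring
      rw [hd]
      simp only [List.filterMap_cons, hc, if_false]
      rw [hs1, ih (s+1)]

theorem pvDots_bounds (t : List Char) (s : Nat) :
    ∀ m ∈ pvDots t s, s < m ∧ m ≤ s + t.length := by
  induction t generalizing s with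
  | nil => simp [pvDots]
  | cons c t ih =>
    intro m hm
    by_cases hc : c = '.' <;> simp only [pvDots, hc, if_true, if_false, List.mem_cons] at hm
    · rcases hm with rfl | hm
      · simp only [List.length_cons]; omega
      · have := ih (s+1) m hm; simp only [List.length_cons]; omega
    · have := ih (s+1) m hm; simp only [List.length_cons]; omega

theorem pvDots_pairwise (t : List Char) (s : Nat) :
    (pvDots t s).Pairwise (· < ·) := by
  induction t generalizing s with
  | nil => simp [pvDots]
  | cons c t ih =>
    by_cases hc : c = '.' <;> simp [pvDots, hc]
    · exact ⟨fun m hm => (pvDots_bounds t (s+1) m hm).1, ih (s+1)⟩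
    · exact ih (s+1)

theorem pvDots_mem (t : List Char) (s : Nat) (m : Nat) :
    m ∈ pvDots t s ↔ ∃ j, t[j]? = some '.' ∧ m = s + j + 1 := by
  induction t generalizing s m with
  | nil => simp [pvDots]
  | cons c t ih =>
    by_cases hc : c = '.' <;> simp [pvDots, hc]
    · constructor
      · rintro (rfl | hm)
        · exact ⟨0, by simp, by omega⟩
        · rcases (ih (s+1) m).1 hm with ⟨j, hj, rfl⟩
          exact ⟨j+1, by simpa using hj, by omega⟩
      · rintro ⟨j, hj, rfl⟩
        cases j with
        | zero => left; omega
        | succ j =>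
          right; apply (ih (s+1) _).2
          exact ⟨j, by simpa using hj, by omega⟩
    · rw [ih (s+1)]
      constructor
      · rintro ⟨j, hj, rfl⟩; exact ⟨j+1, by simpa using hj, by omega⟩
      · rintro ⟨j, hj, rfl⟩
        cases j with
        | zero => simp at hj; exact absurd hj hc
        | succ j => exact ⟨j, by simpa using hj, by omega⟩

theorem pvSuffix_char (hl k : List Char) :
    ('.' :: k) <:+ hl ↔ ∃ j, hl[j]? = some '.' ∧ k = hl.drop (j+1) := by
  constructor
  · rintro ⟨t, rfl⟩
    refine ⟨t.length, ?_, ?_⟩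
    · rw [List.getElem?_append_right (Nat.le_refl _)]; simp
    · have : t ++ '.' :: k = (t ++ ['.']) ++ k := by simp
      rw [this]
      have hlen : (t ++ ['.']).length = t.length + 1 := by simp
      rw [← hlen, List.drop_left]
  · rintro ⟨j, hj, rfl⟩
    have hjlt : j < hl.length := by
      by_contra h
      rw [List.getElem?_eq_none_iff.2 (by omega)] at hj; simp at hj
    have hget : hl[j] = '.' := by
      have := List.getElem?_eq_some_iff.1 hj
      rcases this with ⟨h', e⟩; exact e
    have := List.drop_eq_getElem_cons hjlt
    rw [hget] at this
    rw [← this]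
    exact List.drop_suffix j hl

-- the keys A's loop can match are exactly the nonempty dot-suffixes B enumerates
theorem pvMatch_char (host k : String) (hk : k ≠ "") :
    pvCond host k ↔ ∃ n ∈ 0 :: pvDots host.toList 0, k.toList = host.toList.drop n := by
  unfold pvCond
  constructor
  · rintro ⟨-, h | h⟩
    · exact ⟨0, by simp, by rw [h]; simp⟩
    · rw [PySem.Str.endswith_eq, PySem.Chars.endswith_iff] at h
      have : ('.' :: k.toList) <:+ host.toList := by
        simpa [String.toList_append] using h
      rcases (pvSuffix_char _ _).1 this with ⟨j, hj, he⟩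
      refine ⟨j + 1, ?_, he⟩
      simp only [List.mem_cons]
      right; exact (pvDots_mem _ 0 _).2 ⟨j, hj, by omega⟩
  · rintro ⟨n, hn, he⟩
    refine ⟨hk, ?_⟩
    simp only [List.mem_cons] at hn
    rcases hn with rfl | hn
    · left; simp at he; exact (String.toList_inj.1 he).symm
    · right
      rcases (pvDots_mem _ 0 _).1 hn with ⟨j, hj, rfl⟩
      rw [PySem.Str.endswith_eq, PySem.Chars.endswith_iff]
      have : ('.' :: k.toList) <:+ host.toList :=
        (pvSuffix_char _ _).2 ⟨j, hj, by simpa using he⟩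
      simpa [String.toList_append] using this

theorem pvGet?_isSome_of_mem (l : List (String × pvV)) (kv : String × pvV) :
    kv ∈ l → ((PySem.Dict.mk l).get? kv.1).isSome = true := by
  induction l with
  | nil => intro h; simp at h
  | cons x t ih =>
    intro h
    rw [PySem.Dict.get?_mk_cons]
    rcases List.mem_cons.1 h with rfl | h
    · simp
    · split
      · simp
      · exact ih h

theorem pvFindSplit {α β : Type} (f : α → Option β) (l : List α) (b : β)
    (h : l.findSome? f = some b) :
    ∃ pre a suff, l = pre ++ a :: suff ∧ f a = some b ∧ ∀ x ∈ pre, f x = none := by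
  induction l with
  | nil => simp at h
  | cons x t ih =>
    rw [List.findSome?_cons] at h
    cases hx : f x with
    | some v =>
      rw [hx] at h; simp at h
      exact ⟨[], x, t, by simp, by rw [hx, h], by simp⟩
    | none =>
      rw [hx] at h; simp at h
      rcases ih h with ⟨pre, a, suff, rfl, ha, hpre⟩
      refine ⟨x :: pre, a, suff, by simp, ha, ?_⟩
      intro y hy
      rcases List.mem_cons.1 hy with rfl | hy
      · exact hx
      · exact hpre y hy

-- a fold step never changes the accumulator when no strictly longer match appears
theorem pvFold_stay (host : String) (l : List (String × pvV)) (b : String × Option pvV)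
    (h : ∀ kv ∈ l, pvCond host kv.1 → kv.1.toList.length ≤ b.1.toList.length) :
    l.foldl (pvStep host) b = b := by
  induction l with
  | nil => rfl
  | cons kv t ih =>
    have hstep : pvStep host b kv = b := by
      unfold pvStep
      split
      · rfl
      · split
        · rename_i h1 h2
          have hle := h kv (by simp) ⟨h1, h2⟩
          rw [if_neg]
          rw [gt_iff_lt, PySem.Str.len_eq, PySem.Str.len_eq, not_lt]
          exact_mod_cast hle
        · rfl
    rw [List.foldl_cons, hstep]
    exact ih (fun kv hkv => h kv (by simp [hkv]))

theorem pvFold_none (host : String) (l : List (String × pvV)) (b : String × Option pvV)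
    (h : ∀ kv ∈ l, ¬ pvCond host kv.1) : l.foldl (pvStep host) b = b := by
  apply pvFold_stay
  intro kv hkv hc
  exact absurd hc (h kv hkv)

-- A's fold lands on (k₀, first value of k₀) when k₀ is the unique longest matching key
theorem pvFold_pick (host : String) (k₀ : String) (v₀ : pvV) :
    ∀ (l : List (String × pvV)) (b : String × Option pvV),
    (PySem.Dict.mk l).get? k₀ = some v₀ →
    pvCond host k₀ →
    b.1.toList.length < k₀.toList.length →
    (∀ kv ∈ l, pvCond host kv.1 →
      kv.1.toList.length ≤ k₀.toList.length ∧
      (kv.1.toList.length = k₀.toList.length → kv.1 = k₀)) →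
    l.foldl (pvStep host) b = (k₀, some v₀) := by
  intro l
  induction l with
  | nil =>
    intro b hget
    have : (PySem.Dict.mk ([] : List (String × pvV))).get? k₀ = none := rfl
    rw [this] at hget; simp at hget
  | cons kv t ih =>
    intro b hget hc hlt hall
    rw [PySem.Dict.get?_mk_cons] at hget
    by_cases hk : kv.1 = k₀
    · rw [if_pos (by simp [hk])] at hget
      have hv : kv.2 = v₀ := Option.some.inj hget
      have hstep : pvStep host b kv = (k₀, some v₀) := by
        unfold pvStep
        rw [if_neg (by rw [hk]; exact hc.1), if_pos (by rw [hk]; exact hc.2),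
            if_pos (show PySem.Str.len kv.1 > PySem.Str.len b.1 by
              have h1 : (b.1.toList.length : Int) < (kv.1.toList.length : Int) := by
                rw [hk]; exact_mod_cast hlt
              rw [gt_iff_lt, PySem.Str.len_eq, PySem.Str.len_eq]; exact h1)]
        rw [hk, hv]
      rw [List.foldl_cons, hstep]
      apply pvFold_stay
      intro kv' hkv' hc'
      simpa using (hall kv' (by simp [hkv']) hc').1
    · rw [if_neg (by simpa using hk)] at hget
      have hb' : (pvStep host b kv).1.toList.length < k₀.toList.length := by
        unfold pvStep
        split
        · exact hlt
        · split
          · rename_i h1 h2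
            rcases hall kv (by simp) ⟨h1, h2⟩ with ⟨hle, heq⟩
            split
            · show kv.1.toList.length < k₀.toList.length
              have : kv.1.toList.length ≠ k₀.toList.length := fun e => hk (heq e)
              omega
            · exact hlt
          · exact hlt
      rw [List.foldl_cons]
      exact ih _ hget hc hb' (fun kv' hkv' hc' => hall kv' (by simp [hkv']) hc')

-- B's per-suffix probe, named
def pvProbe (host : String) (sites : List (String × pvV)) (i : Int) : Option (String × pvV) :=
  let key := String.ofList (PySem.List.slice host.toList (some i) none)
  if key ≠ "" ∧ (PySem.Dict.mk sites).contains key then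
    ((PySem.Dict.mk sites).get? key).map (fun v => (key, v))
  else none

theorem pvProbe_nat (host : String) (sites : List (String × pvV)) (n : Nat) :
    pvProbe host sites (n : Int) =
      if String.ofList (host.toList.drop n) ≠ "" ∧
          (PySem.Dict.mk sites).contains (String.ofList (host.toList.drop n)) = true then
        ((PySem.Dict.mk sites).get? (String.ofList (host.toList.drop n))).map
          (fun v => (String.ofList (host.toList.drop n), v))
      else none := by
  unfold pvProbe
  rw [PySem.List.slice_from_natCast]

-- the heart of the equivalence: with the host fixed and nonempty, A's scan over the
-- sites equals B's longest-first walk over the host's dot-suffixes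
theorem pvCore (host : String) (sites : List (String × pvV)) (hh : host ≠ "") :
    (if (PySem.Dict.mk sites).contains host then
      ((PySem.Dict.mk sites).get? host).map (fun v => (host, v))
    else
      match (sites.foldl (pvStep host) ("", none)).2 with
      | none => none
      | some v => some ((sites.foldl (pvStep host) ("", none)).1, v))
    = ((0 : Int) :: (pvDots host.toList 0).map (fun (n : Nat) => (n : Int))).findSome?
        (pvProbe host sites) := by
  have hl0 : String.ofList (PySem.List.slice host.toList (some 0) none) = host := by
    rw [PySem.List.slice_zero_start, PySem.List.slice_none_none, String.ofList_toList]
  rw [List.findSome?_cons]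
  by_cases hcont : (PySem.Dict.mk sites).contains host = true
  · -- exact match: B's first probe (the whole host) hits
    rw [if_pos hcont]
    have hs : ((PySem.Dict.mk sites).get? host).isSome := by
      rw [← PySem.Dict.contains_eq_isSome_get?]; exact hcont
    obtain ⟨v, hv⟩ := Option.isSome_iff_exists.1 hs
    have hp : pvProbe host sites 0 = some (host, v) := by
      unfold pvProbe
      rw [hl0, if_pos ⟨hh, hcont⟩, hv]; rfl
    rw [hp, hv]; rfl
  · -- no exact match: B's first probe misses; compare the loop with the suffix walk
    rw [if_neg hcont]
    have hget : (PySem.Dict.mk sites).get? host = none := by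
      rw [PySem.Dict.contains_eq_isSome_get?] at hcont
      exact Option.not_isSome_iff_eq_none.1 (by simpa using hcont)
    have hp0 : pvProbe host sites 0 = none := by
      unfold pvProbe
      rw [hl0]
      by_cases h : host ≠ "" ∧ (PySem.Dict.mk sites).contains host = true
      · exact absurd h.2 hcont
      · rw [if_neg h]
    rw [hp0]
    rw [show List.findSome? (pvProbe host sites)
            ((pvDots host.toList 0).map (fun (n : Nat) => (n : Int)))
          = List.findSome? (pvProbe host sites ∘ fun n : Nat => (n : Int))
            (pvDots host.toList 0) from List.findSome?_map]
    have hpn : ∀ n : Nat, (pvProbe host sites ∘ fun n : Nat => (n : Int)) n =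
        (if String.ofList (host.toList.drop n) ≠ "" ∧
            (PySem.Dict.mk sites).contains (String.ofList (host.toList.drop n)) = true then
          ((PySem.Dict.mk sites).get? (String.ofList (host.toList.drop n))).map
            (fun v => (String.ofList (host.toList.drop n), v))
        else none) := by
      intro n
      simp only [Function.comp_apply]
      exact pvProbe_nat host sites n
    -- a key that is present in the dict makes its probe hit
    have hhit : ∀ (kv : String × pvV), kv ∈ sites → pvCond host kv.1 →
        ∀ n : Nat, kv.1.toList = host.toList.drop n →
        (pvProbe host sites ∘ fun n : Nat => (n : Int)) n ≠ none := by
      intro kv hkv hc n he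
      have hsome := pvGet?_isSome_of_mem sites kv hkv
      have hkey : String.ofList (host.toList.drop n) = kv.1 := by
        rw [← he, String.ofList_toList]
      rw [hpn n, hkey,
        if_pos ⟨hc.1, by rw [PySem.Dict.contains_eq_isSome_get?]; exact hsome⟩]
      obtain ⟨v, hv⟩ := Option.isSome_iff_exists.1 hsome
      rw [hv]
      simp
    -- a matching key of the dict cannot be the whole host here
    have hnot0 : ∀ (kv : String × pvV), kv ∈ sites → kv.1.toList = host.toList → False := by
      intro kv hkv he
      have hsome := pvGet?_isSome_of_mem sites kv hkv
      have : kv.1 = host := String.toList_inj.1 he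
      rw [this, hget] at hsome
      simp at hsome
    cases hB : ((pvDots host.toList 0).findSome? (pvProbe host sites ∘ fun n : Nat => (n : Int))) with
    | none =>
      -- nothing found: no key of the dict matches, A's loop keeps its seed
      have hnone : ∀ n ∈ pvDots host.toList 0,
          (pvProbe host sites ∘ fun n : Nat => (n : Int)) n = none :=
        List.findSome?_eq_none_iff.1 hB
      have hfold : sites.foldl (pvStep host) ("", none) = ("", none) := by
        apply pvFold_none
        intro kv hkv hc
        rcases (pvMatch_char host kv.1 hc.1).1 hc with ⟨n, hn, he⟩
        rcases List.mem_cons.1 hn with rfl | hn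
        · exact hnot0 kv hkv (by simpa using he)
        · exact hhit kv hkv hc n he (hnone n hn)
      rw [hfold]
    | some b =>
      -- first hit (k₀, v₀): show A's loop lands exactly there
      rcases pvFindSplit _ _ _ hB with ⟨pre, n₀, suff, hsplit, hn₀, hpre⟩
      rw [hpn n₀] at hn₀
      by_cases hcases : String.ofList (host.toList.drop n₀) ≠ "" ∧
          (PySem.Dict.mk sites).contains (String.ofList (host.toList.drop n₀)) = true
      swap
      · rw [if_neg hcases] at hn₀; exact absurd hn₀ (by simp)
      rw [if_pos hcases] at hn₀
      have hsome₀ : ((PySem.Dict.mk sites).get?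
          (String.ofList (host.toList.drop n₀))).isSome = true := by
        rw [← PySem.Dict.contains_eq_isSome_get?]; exact hcases.2
      obtain ⟨v₀, hv₀⟩ := Option.isSome_iff_exists.1 hsome₀
      rw [hv₀] at hn₀
      simp only [Option.map_some] at hn₀
      have hb : b = (String.ofList (host.toList.drop n₀), v₀) := by
        injection hn₀ with h; exact h.symm
      subst hb
      set k₀ : String := String.ofList (host.toList.drop n₀) with hk₀
      have hk₀l : k₀.toList = host.toList.drop n₀ := by rw [hk₀, String.toList_ofList]
      have hn₀mem : n₀ ∈ pvDots host.toList 0 := by rw [hsplit]; simp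
      have hn₀le : n₀ ≤ host.toList.length := by
        have := pvDots_bounds host.toList 0 n₀ hn₀mem; omega
      have hcond : pvCond host k₀ :=
        (pvMatch_char host k₀ hcases.1).2 ⟨n₀, by simp [hn₀mem], hk₀l⟩
      -- every matching key present in the dict is at most as long as k₀
      have hall : ∀ kv ∈ sites, pvCond host kv.1 →
          kv.1.toList.length ≤ k₀.toList.length ∧
          (kv.1.toList.length = k₀.toList.length → kv.1 = k₀) := by
        intro kv hkv hc
        rcases (pvMatch_char host kv.1 hc.1).1 hc with ⟨n, hn, he⟩
        rcases List.mem_cons.1 hn with rfl | hn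
        · exact absurd (by simpa using he) (fun h => hnot0 kv hkv h)
        · -- n ∈ dots and its probe hits, so n is not before n₀
          have hprobe := hhit kv hkv hc n he
          have hnpre : n ∉ pre := fun h => hprobe (hpre n h)
          have hn' : n = n₀ ∨ n ∈ suff := by
            have hmem := hn
            rw [hsplit] at hmem
            rcases List.mem_append.1 hmem with h | h
            · exact absurd h hnpre
            · rcases List.mem_cons.1 h with h | h
              · exact Or.inl h
              · exact Or.inr h
          have hn₀n : n₀ ≤ n := by
            rcases hn' with rfl | hs
            · exact Nat.le_refl n
            · have hpw := pvDots_pairwise host.toList 0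
              rw [hsplit] at hpw
              rcases List.pairwise_append.1 hpw with ⟨-, hpw2, -⟩
              rcases List.pairwise_cons.1 hpw2 with ⟨hlt, -⟩
              exact Nat.le_of_lt (hlt n hs)
          have hnle : n ≤ host.toList.length := by
            have := pvDots_bounds host.toList 0 n hn; omega
          rw [he, hk₀l, List.length_drop, List.length_drop]
          constructor
          · omega
          · intro hle
            have hnn : n = n₀ := by omega
            rw [hnn] at he
            rw [← String.toList_inj, he, hk₀l]
      have hpos : 0 < k₀.toList.length := by
        cases h : k₀.toList with
        | nil => exact absurd (String.toList_eq_nil_iff.1 h) hcases.1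
        | cons _ _ => simp
      have hfold := pvFold_pick host k₀ v₀ sites ("", none) hv₀ hcond (by simpa using hpos) hall
      rw [hfold]

-- ===== VERDICT (by name: the statement is the Claim_ definition above) =====
theorem match_site_config_spec : Claim_equal_match_site_config := by
  intro hostname sites _
  unfold Spec_match_site_config match_site_config match_site_config_alt
  simp only []
  set host := PySem.Str.lower (PySem.Str.strip hostname) with hhost
  by_cases hh : host = ""
  · rw [if_pos hh, if_pos hh]
  · rw [if_neg hh, if_neg hh]
    rw [show PySem.List.enumerate host.toList 0
          = PySem.List.enumerate host.toList ((0 : Nat) : Int) from rfl,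
        pvDots_eq_filterMap host.toList 0]
    exact pvCore host sites hh
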